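-- pv_equiv track=rewrite | github.com/Flourish3/AdventOfCode | 2020/python/05.py | getRowOrColumn
-- ===== SOURCE A (Python) =====
-- from typing import List
--
-- def getRowOrColumn(ops: List[str]) -> int:
--     min = 0
--     max = 2 ** len(ops) - 1
--     for op in ops:
--         middle = (max-min) // 2 + min
--         if op == "1":
--             min = middle + 1
--         else:
--             max = middle
--     return min
-- ===== SOURCE B (Python) =====
-- from typing import List
--
-- def getRowOrColumn(ops: List[str]) -> int:
--     result = 0
--     for op in ops:
--         result = result * 2 + (1 if op == "1" else 0)
--     return result
-- ===== Notes on version B (the rewrite author's own statement) =====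
-- stated objective: faster
-- what changed: Replaces the [min,max] range halving (which builds 2**len(ops)-1 up front and does big-int subtraction, floor division and two-bound updates every iteration) by a single running accumulator result = result*2 + bit per op.
import Mathlib
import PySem

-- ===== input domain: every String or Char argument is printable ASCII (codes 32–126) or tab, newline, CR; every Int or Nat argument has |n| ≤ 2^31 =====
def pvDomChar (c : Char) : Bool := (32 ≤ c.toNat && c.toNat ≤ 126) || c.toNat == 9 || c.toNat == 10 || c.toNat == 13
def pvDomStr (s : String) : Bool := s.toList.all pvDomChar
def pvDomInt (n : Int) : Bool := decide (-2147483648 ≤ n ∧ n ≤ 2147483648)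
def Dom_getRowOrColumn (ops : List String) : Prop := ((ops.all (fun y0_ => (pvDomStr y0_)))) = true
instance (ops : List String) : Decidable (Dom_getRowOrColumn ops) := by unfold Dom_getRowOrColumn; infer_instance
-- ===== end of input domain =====

-- ===== PORT A =====
-- B replaces A's [min,max] range halving by a bit accumulator (simpler decomposition).
def getRowOrColumn (ops : List String) : Int :=
  (ops.foldl
    (fun (mm : Int × Int) op =>
      let middle := PySem.Int.floordiv (mm.2 - mm.1) 2 + mm.1
      if op == "1" then (middle + 1, mm.2) else (mm.1, middle))
    (0, 2 ^ ops.length - 1)).1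

-- ===== PORT B =====
def getRowOrColumn_alt (ops : List String) : Int :=
  ops.foldl (fun acc op => acc * 2 + (if op == "1" then 1 else 0)) 0

-- ===== PRECONDITION & SPEC =====
def Spec_getRowOrColumn (ops : List String) (out : Int) : Prop := out = getRowOrColumn_alt ops
instance (ops : List String) (out : Int) : Decidable (Spec_getRowOrColumn ops out) := by unfold Spec_getRowOrColumn; infer_instance

-- ===== CLAIM (what is proved, stated in full; the proofs are below) =====
def Claim_equal_getRowOrColumn : Prop := ∀ (ops : List String), Dom_getRowOrColumn ops → Spec_getRowOrColumn ops (getRowOrColumn ops)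

-- ===== LEMMAS AND PROOFS =====

-- ===== VERDICT (by name: the statement is the Claim_ definition above) =====
-- bval ops = the binary value of ops read head-first (bit i weighted 2^(len-1-i))
def bval : List String → Int
  | [] => 0
  | op :: t => (if op == "1" then 1 else 0) * 2 ^ t.length + bval t

lemma fdiv_pow_sub_one (k : Nat) :
    PySem.Int.floordiv ((2:Int) ^ (k+1) - 1) 2 = 2 ^ k - 1 := by
  rw [PySem.Int.floordiv_eq_ediv_of_pos (by omega)]
  have : (2:Int) ^ (k+1) - 1 = (2 ^ k - 1) * 2 + 1 := by ring
  rw [this]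
  omega

lemma loopA_eq (ops : List String) : ∀ (mn : Int),
    (ops.foldl
      (fun (mm : Int × Int) op =>
        if op == "1" then (PySem.Int.floordiv (mm.2 - mm.1) 2 + mm.1 + 1, mm.2)
        else (mm.1, PySem.Int.floordiv (mm.2 - mm.1) 2 + mm.1))
      (mn, mn + 2 ^ ops.length - 1)).1 = mn + bval ops := by
  induction ops with
  | nil => intro mn; simp [bval]
  | cons op t ih =>
    intro mn
    simp only [List.foldl, List.length_cons, bval]
    have hm : mn + 2 ^ (t.length + 1) - 1 - mn = 2 ^ (t.length + 1) - 1 := by ring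
    rw [hm, fdiv_pow_sub_one]
    by_cases h : op == "1"
    · simp only [h, if_true]
      have h1 : (2:Int) ^ t.length - 1 + mn + 1 = mn + 2 ^ t.length := by ring
      have h2 : mn + (2:Int) ^ (t.length + 1) - 1 = (mn + 2 ^ t.length) + 2 ^ t.length - 1 := by ring
      rw [h1, h2, ih (mn + 2 ^ t.length)]
      ring
    · simp only [h, Bool.false_eq_true, if_false]
      have h2 : (2:Int) ^ t.length - 1 + mn = mn + 2 ^ t.length - 1 := by ring
      rw [h2, ih mn]
      simp

lemma foldB_eq (ops : List String) : ∀ (acc : Int),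
    ops.foldl (fun acc op => acc * 2 + (if op == "1" then 1 else 0)) acc
      = acc * 2 ^ ops.length + bval ops := by
  induction ops with
  | nil => intro acc; simp [bval]
  | cons op t ih =>
    intro acc
    simp only [List.foldl, List.length_cons, bval]
    rw [ih]
    ring

theorem getRowOrColumn_spec : Claim_equal_getRowOrColumn := by
  intro ops _
  unfold Spec_getRowOrColumn getRowOrColumn getRowOrColumn_alt
  rw [foldB_eq]
  have h := loopA_eq ops 0
  simp only [zero_add] at h
  rw [h]
  simp
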